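-- pv_equiv track=rewrite | github.com/HyeonBhinKim/codetree-TILs | 240907/최소 와이파이 수/minimum-number-of-wifi.py | min_wifi_installations
-- ===== SOURCE A (Python) =====
-- def min_wifi_installations(n, m, people):
--     wifi_count = 0
--     i = 0
--
--     while i < n:
--         # 현재 위치에서 가장 오른쪽에 설치할 수 있는 위치 찾기
--         while i < n and people[i] == 0:
--             i += 1
--
--         if i >= n:  # 더 이상 사람을 찾을 수 없는 경우
--             break
--
--         # 와이파이를 설치할 위치를 결정 (사람이 있는 위치에서 m 거리만큼 오른쪽)
--         wifi_count += 1
--         wifi_position = i + m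
--
--         # 설치한 와이파이로 커버하는 최대한 오른쪽 위치 찾기
--         while i < n and i <= wifi_position + m:
--             i += 1
--
--     return wifi_count
-- ===== SOURCE B (Python) =====
-- def min_wifi_installations(n, m, people):
--     # Pre-index the people positions once, then greedy with BINARY-SEARCH jumps:
--     # each installed router skips straight to the first uncovered person by
--     # bisection on the (sorted) position list instead of scanning slot by slot.
--     pos = [j for j in range(n) if people[j] != 0]
--     k = len(pos)
--     count = 0
--     i = 0
--     while i < k:
--         count += 1
--         target = pos[i] + 2 * m
--         lo, hi = i + 1, k
--         while lo < hi:
--             mid = (lo + hi) // 2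
--             if pos[mid] <= target:
--                 lo = mid + 1
--             else:
--                 hi = mid
--         i = lo
--     return count
-- ===== Notes on version B (the rewrite author's own statement) =====
-- stated objective: alternative
-- what changed: B pre-indexes the people positions once and then, for each installed router, jumps to the first uncovered person by hand-written binary search on that sorted position list, instead of A's nested slot-by-slot zero-skipping and coverage-advancing while loops.
-- outside the precondition, e.g. on min_wifi_installations(5, 10, [1]): A returns 1, B raises IndexError
import Mathlib
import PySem

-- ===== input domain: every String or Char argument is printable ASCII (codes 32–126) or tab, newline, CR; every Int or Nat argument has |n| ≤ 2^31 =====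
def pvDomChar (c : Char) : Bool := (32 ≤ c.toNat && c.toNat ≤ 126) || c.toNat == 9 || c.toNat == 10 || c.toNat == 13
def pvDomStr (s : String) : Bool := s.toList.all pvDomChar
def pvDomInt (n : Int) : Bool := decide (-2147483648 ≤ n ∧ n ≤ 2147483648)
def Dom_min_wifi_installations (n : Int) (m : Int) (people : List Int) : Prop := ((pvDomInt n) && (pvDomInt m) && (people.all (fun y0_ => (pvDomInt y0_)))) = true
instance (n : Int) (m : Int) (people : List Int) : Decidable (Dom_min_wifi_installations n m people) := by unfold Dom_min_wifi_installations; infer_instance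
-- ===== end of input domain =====

-- B pre-indexes the people positions and jumps with hand-written binary search per router,
-- replacing A's nested slot-by-slot while loops (objective: alternative algorithm).


-- ===== PORT A =====
-- inner 'while i < n and people[i] == 0: i += 1'
-- (people[i] ported with pyGetD: under Pre_ the index is always in range, so this is exact)
def aSkip (n : Int) (people : List Int) (i : Int) : Int :=
  if _h : i < n ∧ PySem.List.pyGetD people i 0 = 0 then aSkip n people (i + 1) else i
termination_by (n - i).toNat
decreasing_by omega

-- inner 'while i < n and i <= wifi_position + m: i += 1'
def aCover (n : Int) (lim : Int) (i : Int) : Int :=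
  if _h : i < n ∧ i ≤ lim then aCover n lim (i + 1) else i
termination_by (n - i).toNat
decreasing_by omega

-- outer 'while i < n' loop; the fuel only makes the recursion total in Lean: under
-- Pre_ (0 ≤ m) each iteration advances i by at least 1, so n.toNat + 1 never runs out
def aLoop (fuel : Nat) (n : Int) (m : Int) (people : List Int) (i : Int) (cnt : Int) : Int :=
  match fuel with
  | 0 => cnt
  | Nat.succ fuel =>
    if i < n then
      let i1 := aSkip n people i
      if n ≤ i1 then cnt
      else aLoop fuel n m people (aCover n ((i1 + m) + m) i1) (cnt + 1)
    else cnt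

def min_wifi_installations (n : Int) (m : Int) (people : List Int) : Int :=
  aLoop (n.toNat + 1) n m people 0 0

-- ===== PORT B =====
-- pos = [j for j in range(n) if people[j] != 0]
def bPositions (n : Int) (people : List Int) : List Int :=
  (PySem.List.pyRange 0 n 1).filter (fun j => PySem.List.pyGetD people j 0 != 0)

-- inner 'while lo < hi' bisection loop of B; the fuel only makes the recursion total
-- in Lean: the interval halves each step, so (hi - lo).toNat + 1 steps never run out
def bSearch (fuel : Nat) (pos : List Int) (t : Int) (lo hi : Int) : Int :=
  match fuel with
  | 0 => lo
  | Nat.succ fuel =>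
    if lo < hi then
      if PySem.List.pyGetD pos (PySem.Int.floordiv (lo + hi) 2) 0 ≤ t then
        bSearch fuel pos t (PySem.Int.floordiv (lo + hi) 2 + 1) hi
      else
        bSearch fuel pos t lo (PySem.Int.floordiv (lo + hi) 2)
    else lo

-- outer 'while i < k' loop of B; i strictly increases each iteration, so the fuel
-- k.toNat + 1 never runs out
def bGo (fuel : Nat) (pos : List Int) (k : Int) (m : Int) (i : Int) (cnt : Int) : Int :=
  match fuel with
  | 0 => cnt
  | Nat.succ fuel =>
    if i < k then
      bGo fuel pos k m
        (bSearch ((k - (i + 1)).toNat + 1) pos (PySem.List.pyGetD pos i 0 + 2 * m) (i + 1) k)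
        (cnt + 1)
    else cnt

def min_wifi_installations_alt (n : Int) (m : Int) (people : List Int) : Int :=
  bGo ((bPositions n people).length + 1) (bPositions n people)
    ((bPositions n people).length : Int) m 0 0

-- ===== PRECONDITION & SPEC =====
-- Pre_ excludes: (a) n > len(people), where A indexes out of range (it raises on most such
-- inputs; where coverage happens to jump past the array end A returns but B naturally raises,
-- see the cite); (b) m < 0 while some person exists in range, where A loops forever.
def Pre_min_wifi_installations (n : Int) (m : Int) (people : List Int) : Prop :=
  n ≤ people.length ∧
    (0 ≤ m ∨ ∀ j ∈ PySem.List.pyRange 0 n 1, PySem.List.pyGetD people j 0 = 0)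
instance (n : Int) (m : Int) (people : List Int) : Decidable (Pre_min_wifi_installations n m people) := by
  unfold Pre_min_wifi_installations; infer_instance

def pvWitness_min_wifi_installations : Int × Int × List Int := (3, 1, [1, 0, 1])

def Spec_min_wifi_installations (n : Int) (m : Int) (people : List Int) (out : Int) : Prop := out = min_wifi_installations_alt n m people
instance (n : Int) (m : Int) (people : List Int) (out : Int) : Decidable (Spec_min_wifi_installations n m people out) := by unfold Spec_min_wifi_installations; infer_instance

-- ===== CLAIM (what is proved, stated in full; the proofs are below) =====
def Claim_equal_min_wifi_installations : Prop := ∀ (n : Int) (m : Int) (people : List Int), Dom_min_wifi_installations n m people → Pre_min_wifi_installations n m people → Spec_min_wifi_installations n m people (min_wifi_installations n m people)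

-- ===== LEMMAS AND PROOFS =====

-- people positions at indices ≥ i (proof-only abstraction of the remaining work)
def Pfrom (n : Int) (people : List Int) (i : Int) : List Int :=
  (PySem.List.pyRange i n 1).filter (fun j => PySem.List.pyGetD people j 0 != 0)

-- reference greedy on the position list
def greedy (m : Int) : List Int → Int
  | [] => 0
  | p :: rest => 1 + greedy m (rest.dropWhile (fun x => x ≤ p + 2 * m))
termination_by l => l.length
decreasing_by
  exact Nat.lt_succ_of_le (List.length_dropWhile_le _ _)

theorem Pfrom_of_le {n : Int} (people : List Int) {i : Int} (h : n ≤ i) :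
    Pfrom n people i = [] := by
  simp [Pfrom, PySem.List.pyRange_one_eq_nil h]

theorem Pfrom_cons {n : Int} (people : List Int) {i : Int} (h : i < n) :
    Pfrom n people i =
      if PySem.List.pyGetD people i 0 != 0
      then i :: Pfrom n people (i + 1) else Pfrom n people (i + 1) := by
  by_cases hv : PySem.List.pyGetD people i 0 != 0
  · simp only [Pfrom, PySem.List.pyRange_one_cons h, List.filter_cons, hv, if_pos]
  · simp only [Pfrom, PySem.List.pyRange_one_cons h, List.filter_cons, hv,
      Bool.false_eq_true, if_false]

theorem mem_Pfrom {n : Int} {people : List Int} {i x : Int}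
    (h : x ∈ Pfrom n people i) : i ≤ x ∧ x < n := by
  have := List.mem_filter.mp h
  exact (PySem.List.mem_pyRange_one.mp this.1)

theorem bPositions_eq (n : Int) (people : List Int) :
    bPositions n people = Pfrom n people 0 := rfl

-- ---- B-side: the bisection loop finds the dropWhile boundary on a sorted list ----

theorem bPositions_sorted (n : Int) (people : List Int) :
    (bPositions n people).Pairwise (· < ·) :=
  List.Pairwise.filter _ (PySem.List.pairwise_lt_pyRange_one 0 n)

theorem sorted_getD_mono {pos : List Int} (hs : pos.Pairwise (· < ·))
    {j j' : Nat} (hle : j ≤ j') (hlt : j' < pos.length) :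
    pos.getD j 0 ≤ pos.getD j' 0 := by
  rcases Nat.lt_or_ge j j' with h | h
  · have := (List.pairwise_iff_getElem.mp hs) j j' (by omega) hlt h
    rw [List.getD_eq_getElem pos 0 (by omega), List.getD_eq_getElem pos 0 hlt]
    omega
  · have : j = j' := by omega
    subst this; rfl

theorem pyGetD_getD {pos : List Int} {j : Int} (h0 : 0 ≤ j) :
    PySem.List.pyGetD pos j 0 = pos.getD j.toNat 0 := by
  have hc : ((j.toNat : Nat) : Int) = j := by omega
  rw [← hc, PySem.List.pyGetD_natCast, Int.toNat_natCast]

theorem bSearch_spec {pos : List Int} (hs : pos.Pairwise (· < ·)) (t : Int) :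
    ∀ (fuel : Nat) (lo hi : Int), (hi - lo).toNat < fuel →
      0 ≤ lo → lo ≤ hi → hi ≤ (pos.length : Int) →
      lo ≤ bSearch fuel pos t lo hi ∧ bSearch fuel pos t lo hi ≤ hi ∧
      (∀ j : Int, lo ≤ j → j < bSearch fuel pos t lo hi → PySem.List.pyGetD pos j 0 ≤ t) ∧
      (bSearch fuel pos t lo hi < hi → t < PySem.List.pyGetD pos (bSearch fuel pos t lo hi) 0) := by
  intro fuel
  induction fuel with
  | zero => intro lo hi hf; omega
  | succ fuel ih =>
    intro lo hi hf hlo hlh hhi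
    by_cases h : lo < hi
    · have hm1 : lo ≤ PySem.Int.floordiv (lo + hi) 2 :=
        (PySem.Int.le_floordiv_iff_mul_le (by omega)).mpr (by omega)
      have hm2 : PySem.Int.floordiv (lo + hi) 2 < hi :=
        (PySem.Int.floordiv_lt_iff_lt_mul (by omega)).mpr (by omega)
      by_cases hc : PySem.List.pyGetD pos (PySem.Int.floordiv (lo + hi) 2) 0 ≤ t
      · rw [bSearch, if_pos h, if_pos hc]
        obtain ⟨r1, r2, r3, r4⟩ :=
          ih (PySem.Int.floordiv (lo + hi) 2 + 1) hi (by omega) (by omega) (by omega) hhi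
        refine ⟨by omega, r2, ?_, r4⟩
        intro j hj1 hj2
        by_cases hjm : PySem.Int.floordiv (lo + hi) 2 + 1 ≤ j
        · exact r3 j hjm hj2
        · -- lo ≤ j ≤ mid: use sortedness against pos[mid] ≤ t
          have hjn : PySem.List.pyGetD pos j 0 = pos.getD j.toNat 0 := pyGetD_getD (by omega)
          have hmn : PySem.List.pyGetD pos (PySem.Int.floordiv (lo + hi) 2) 0 =
              pos.getD (PySem.Int.floordiv (lo + hi) 2).toNat 0 := pyGetD_getD (by omega)
          have := sorted_getD_mono hs (j := j.toNat)
            (j' := (PySem.Int.floordiv (lo + hi) 2).toNat) (by omega) (by omega)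
          rw [hjn]
          rw [hmn] at hc
          omega
      · rw [bSearch, if_pos h, if_neg hc]
        obtain ⟨r1, r2, r3, r4⟩ :=
          ih lo (PySem.Int.floordiv (lo + hi) 2) (by omega) hlo (by omega) (by omega)
        refine ⟨r1, by omega, r3, ?_⟩
        intro _
        by_cases hr : bSearch fuel pos t lo (PySem.Int.floordiv (lo + hi) 2) <
            PySem.Int.floordiv (lo + hi) 2
        · exact r4 hr
        · have : bSearch fuel pos t lo (PySem.Int.floordiv (lo + hi) 2) =
              PySem.Int.floordiv (lo + hi) 2 := by omega
          rw [this]; omega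
    · rw [bSearch, if_neg h]
      exact ⟨le_refl _, by omega, by intro j h1 h2; omega, by intro hc; omega⟩

-- a prefix all ≤ t followed by a first element > t is exactly what dropWhile removes
theorem dropWhile_drop (pos : List Int) (t : Int) :
    ∀ (d lo r : Nat), r - lo ≤ d → lo ≤ r → r ≤ pos.length →
      (∀ j : Nat, lo ≤ j → j < r → pos.getD j 0 ≤ t) →
      (r < pos.length → t < pos.getD r 0) →
      (pos.drop lo).dropWhile (fun x => x ≤ t) = pos.drop r := by
  intro d
  induction d with
  | zero =>
    intro lo r hd h1 h2 _ h4
    have : lo = r := by omega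
    subst this
    by_cases hr : lo < pos.length
    · rw [List.drop_eq_getElem_cons hr, List.dropWhile_cons]
      have := h4 hr
      rw [List.getD_eq_getElem pos 0 hr] at this
      simp only [show ¬ (pos[lo] ≤ t) by omega, decide_false, Bool.false_eq_true, if_false]
    · rw [List.drop_of_length_le (by omega)]
      rfl
  | succ d ih =>
    intro lo r hd h1 h2 h3 h4
    by_cases heq : lo = r
    · subst heq
      by_cases hr : lo < pos.length
      · rw [List.drop_eq_getElem_cons hr, List.dropWhile_cons]
        have := h4 hr
        rw [List.getD_eq_getElem pos 0 hr] at this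
        simp only [show ¬ (pos[lo] ≤ t) by omega, decide_false, Bool.false_eq_true, if_false]
      · rw [List.drop_of_length_le (by omega)]
        rfl
    · have hlo : lo < pos.length := by omega
      rw [List.drop_eq_getElem_cons hlo, List.dropWhile_cons]
      have := h3 lo (le_refl _) (by omega)
      rw [List.getD_eq_getElem pos 0 hlo] at this
      simp only [this, decide_true, if_true]
      exact ih (lo + 1) r (by omega) (by omega) h2 (fun j hj1 hj2 => h3 j (by omega) hj2) h4

-- B's outer loop computes the reference greedy on the suffix of positions
theorem bGo_eq {pos : List Int} (hs : pos.Pairwise (· < ·)) (m : Int) :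
    ∀ (fuel : Nat) (i cnt : Int), 0 ≤ i → ((pos.length : Int) - i).toNat < fuel →
      bGo fuel pos (pos.length : Int) m i cnt = cnt + greedy m (pos.drop i.toNat) := by
  intro fuel
  induction fuel with
  | zero => intro i cnt hi hf; omega
  | succ fuel ih =>
    intro i cnt hi hf
    by_cases h : i < (pos.length : Int)
    · rw [bGo, if_pos h]
      have hilen : i.toNat < pos.length := by omega
      set t := PySem.List.pyGetD pos i 0 + 2 * m with ht
      obtain ⟨r1, r2, r3, r4⟩ := bSearch_spec hs t (((pos.length : Int) - (i + 1)).toNat + 1)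
        (i + 1) (pos.length : Int) (by omega) (by omega) (by omega) (le_refl _)
      set r := bSearch (((pos.length : Int) - (i + 1)).toNat + 1) pos t (i + 1)
        (pos.length : Int) with hr
      have hdw : (pos.drop (i + 1).toNat).dropWhile (fun x => x ≤ t) = pos.drop r.toNat := by
        apply dropWhile_drop pos t (r.toNat - (i + 1).toNat) ((i + 1).toNat) r.toNat
          (le_refl _) (by omega) (by omega)
        · intro j hj1 hj2
          have := r3 (j : Int) (by omega) (by omega)
          rwa [PySem.List.pyGetD_natCast] at this
        · intro hrl
          have := r4 (by omega)
          rwa [show r = ((r.toNat : Nat) : Int) by omega, PySem.List.pyGetD_natCast] at this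
      have hpget : PySem.List.pyGetD pos i 0 = pos[i.toNat] := by
        rw [pyGetD_getD (by omega), List.getD_eq_getElem pos 0 hilen]
      rw [ih r (cnt + 1) (by omega) (by omega), List.drop_eq_getElem_cons hilen,
        show i.toNat + 1 = (i + 1).toNat by omega, greedy, ← hpget, ← ht, hdw]
      omega
    · rw [bGo, if_neg h, List.drop_of_length_le (by omega), greedy]
      omega

-- A's helpers (unchanged from the A-side analysis)
theorem aSkip_spec (n : Int) (people : List Int) :
    ∀ i : Int,
      i ≤ aSkip n people i ∧
        ((n ≤ aSkip n people i ∧ Pfrom n people i = []) ∨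
         (aSkip n people i < n ∧
            Pfrom n people i = aSkip n people i :: Pfrom n people (aSkip n people i + 1))) := by
  intro i
  induction i using aSkip.induct n people with
  | case1 i h ih =>
    rw [aSkip, dif_pos h]
    refine ⟨by omega, ?_⟩
    have hz : (PySem.List.pyGetD people i 0 != 0) = false := by
      simp [h.2]
    rw [Pfrom_cons people h.1, hz]
    simpa using ih.2
  | case2 i h =>
    rw [aSkip, dif_neg h]
    refine ⟨le_refl _, ?_⟩
    by_cases hn : n ≤ i
    · exact Or.inl ⟨hn, Pfrom_of_le people hn⟩
    · have hi : i < n := by omega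
      have hv : PySem.List.pyGetD people i 0 ≠ 0 := by
        intro hc; exact h ⟨hi, hc⟩
      refine Or.inr ⟨hi, ?_⟩
      rw [Pfrom_cons people hi]
      simp [hv]

theorem aCover_eq (n lim : Int) :
    ∀ i : Int, i ≤ lim + 1 → i ≤ n → aCover n lim i = min n (lim + 1) := by
  intro i
  induction i using aCover.induct n lim with
  | case1 i h ih =>
    intro _ _
    rw [aCover, dif_pos h]
    exact ih (by omega) (by omega)
  | case2 i h =>
    intro h1 h2
    rw [aCover, dif_neg h]
    omega

theorem dropWhile_Pfrom (n : Int) (people : List Int) (lim : Int) :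
    ∀ j : Int, j ≤ lim + 1 →
      (Pfrom n people j).dropWhile (fun x => x ≤ lim) = Pfrom n people (min n (lim + 1)) := by
  have key : ∀ (k : Nat) (j : Int), (n - j).toNat ≤ k → j ≤ lim + 1 →
      (Pfrom n people j).dropWhile (fun x => x ≤ lim) = Pfrom n people (min n (lim + 1)) := by
    intro k
    induction k with
    | zero =>
      intro j hk hj
      have hn : n ≤ j := by omega
      rw [Pfrom_of_le people hn, Pfrom_of_le people (by omega)]
      rfl
    | succ k ih =>
      intro j hk hj
      by_cases hn : n ≤ j
      · rw [Pfrom_of_le people hn, Pfrom_of_le people (by omega)]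
        rfl
      · have hjn : j < n := by omega
        rw [Pfrom_cons people hjn]
        by_cases hv : PySem.List.pyGetD people j 0 != 0
        · rw [if_pos hv]
          by_cases hl : j ≤ lim
          · rw [List.dropWhile_cons]
            simp only [hl, decide_true, if_true]
            exact ih (j + 1) (by omega) (by omega)
          · have hj' : j = lim + 1 := by omega
            rw [List.dropWhile_cons]
            simp only [hl, decide_false, Bool.false_eq_true, if_false]
            have : min n (lim + 1) = j := by omega
            rw [this, Pfrom_cons people hjn, if_pos hv]
        · rw [if_neg hv]
          by_cases hl : j ≤ lim
          · exact ih (j + 1) (by omega) (by omega)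
          · have hj' : j = lim + 1 := by omega
            have : min n (lim + 1) = j := by omega
            rw [this, Pfrom_cons people hjn, if_neg hv]
            apply List.dropWhile_eq_self_iff.mpr
            intro hlen
            have hm := mem_Pfrom (List.getElem_mem hlen)
            simp only [decide_eq_true_eq]
            omega
  intro j hj
  exact key (n - j).toNat j (le_refl _) hj

theorem aLoop_eq (n m : Int) (people : List Int) (hm : 0 ≤ m) :
    ∀ (fuel : Nat) (i cnt : Int), (n - i).toNat < fuel →
      aLoop fuel n m people i cnt = cnt + greedy m (Pfrom n people i) := by
  intro fuel
  induction fuel with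
  | zero => intro i cnt h; omega
  | succ fuel ih =>
    intro i cnt hfuel
    by_cases hin : i < n
    · rcases aSkip_spec n people i with ⟨hle, hcase | hcase⟩
      · rw [aLoop, if_pos hin, if_pos hcase.1, hcase.2]
        simp [greedy]
      · obtain ⟨hi1, hP⟩ := hcase
        set i1 := aSkip n people i with hi1def
        rw [aLoop, if_pos hin, if_neg (by omega)]
        have hcov : aCover n ((i1 + m) + m) i1 = min n ((i1 + m) + m + 1) :=
          aCover_eq n _ i1 (by omega) (by omega)
        have hdrop := dropWhile_Pfrom n people (i1 + 2 * m) (i1 + 1) (by omega)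
        have hmin : min n ((i1 + m) + m + 1) = min n (i1 + 2 * m + 1) := by omega
        rw [hcov, hmin, ih _ (cnt + 1) (by omega), hP, greedy, ← hdrop]
        omega
    · rw [aLoop, if_neg hin, Pfrom_of_le people (by omega), greedy]
      omega

theorem alt_eq_greedy (n m : Int) (people : List Int) :
    min_wifi_installations_alt n m people = greedy m (Pfrom n people 0) := by
  rw [min_wifi_installations_alt,
    bGo_eq (bPositions_sorted n people) m ((bPositions n people).length + 1) 0 0
      (le_refl 0) (by omega)]
  simp [bPositions_eq]

-- ===== VERDICT (by name: the statement is the Claim_ definition above) =====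
theorem min_wifi_installations_spec : Claim_equal_min_wifi_installations := by
  intro n m people _hdom hpre
  unfold Spec_min_wifi_installations
  obtain ⟨_hlen, hm | hzero⟩ := hpre
  · rw [min_wifi_installations, alt_eq_greedy,
      aLoop_eq n m people hm (n.toNat + 1) 0 0 (by omega)]
    omega
  · have hP0 : Pfrom n people 0 = [] := by
      rw [Pfrom]
      apply List.filter_eq_nil_iff.mpr
      intro j hj
      simp [hzero j hj]
    rw [alt_eq_greedy, hP0]
    rw [min_wifi_installations]
    rcases Nat.exists_eq_succ_of_ne_zero (n := n.toNat + 1) (by omega) with ⟨f, hf⟩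
    rw [hf, aLoop]
    by_cases hn : (0 : Int) < n
    · simp only [if_pos hn]
      rcases aSkip_spec n people 0 with ⟨_, ⟨hge, _⟩ | ⟨hlt, hcons⟩⟩
      · rw [if_pos hge]; simp [greedy]
      · rw [hP0] at hcons; exact absurd hcons (by simp)
    · rw [if_neg hn]; simp [greedy]
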